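-- pv_equiv track=rewrite | github.com/Radcliffe/OEIS-Python | src/oeispy/A344/A344888.py | A344888
-- ===== SOURCE A (Python) =====
-- def A344888(n):
--     b, m = 2, n
--     while True:
--         m, x = divmod(m, b)
--         m, y = divmod(m, b)
--         while m > 0:
--             m, z = divmod(m,b)
--             if z != x:
--                 break
--             if m > 0:
--                 m, z = divmod(m,b)
--                 if z != y:
--                     break
--             else:
--                 return b
--         else:
--             return b
--         b += 1
--         m = n # _Chai Wah Wu_, Jun 02 2021
-- ===== SOURCE B (Python) =====
-- def A344888(n):
--     b = 2
--     while True: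
--         digits = []
--         m = n
--         while m > 0:
--             m, d = divmod(m, b)
--             digits.append(d)
--         if all(p == q for p, q in zip(digits, digits[2:])):
--             return b
--         b += 1
-- ===== Notes on version B (the rewrite author's own statement) =====
-- stated objective: simpler
-- what changed: B builds the full base-b digit list with one uniform divmod loop and tests the xyxy alternation in a separate vacuous-friendly pass (zip of the list with itself shifted by 2), replacing A's interleaved one-pass check with its x/y extraction, nested while/else and break logic.
import Mathlib
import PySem

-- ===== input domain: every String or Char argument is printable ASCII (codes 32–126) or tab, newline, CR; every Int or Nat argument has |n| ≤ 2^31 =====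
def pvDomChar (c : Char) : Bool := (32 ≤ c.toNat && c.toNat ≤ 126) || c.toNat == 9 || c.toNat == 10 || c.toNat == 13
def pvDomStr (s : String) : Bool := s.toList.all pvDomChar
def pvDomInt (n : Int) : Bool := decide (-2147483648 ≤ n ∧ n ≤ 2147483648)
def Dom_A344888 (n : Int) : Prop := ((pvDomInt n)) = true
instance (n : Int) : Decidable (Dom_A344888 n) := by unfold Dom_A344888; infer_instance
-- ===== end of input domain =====

-- B replaces A's interleaved x/y check (nested while/else with breaks) by: build the full
-- base-b digit list with one uniform divmod loop, then test the xyxy alternation in a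
-- separate pass (zip of the list with itself shifted by 2).  Objective: simpler.

-- termination helper for the divmod loops (cited by decreasing_by)
theorem pvFloordiv_shrink {m b : Int} (hb : 1 < b) (hm : 0 < m) :
    0 ≤ PySem.Int.floordiv m b ∧ PySem.Int.floordiv m b < m := by
  rw [PySem.Int.floordiv_eq_ediv_of_pos (by omega)]
  constructor
  · exact Int.ediv_nonneg (le_of_lt hm) (by omega)
  · exact Int.ediv_lt_of_lt_mul (by omega) (by nlinarith)

-- ===== PORT A =====
-- A's inner 'while m > 0: …' loop; x, y are the two low digits already extracted.
-- The conjunct '1 < b' in the guard is a totality guard only (b starts at 2 and grows);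
-- divmod(m, b) is ported as PySem.Int.floordiv / PySem.Int.mod (exact since b ≠ 0).
-- Returns true where Python does 'return b' (the while-else or the early return),
-- false where Python breaks out to try the next base b += 1.
def pyInner (b x y : Int) (m : Int) : Bool :=
  if h : 1 < b ∧ 0 < m then
    if PySem.Int.mod m b ≠ x then false                               -- 'if z != x: break'
    else if h' : 0 < PySem.Int.floordiv m b then                      -- 'if m > 0:'
      if PySem.Int.mod (PySem.Int.floordiv m b) b ≠ y then false      -- 'if z != y: break'
      else pyInner b x y (PySem.Int.floordiv (PySem.Int.floordiv m b) b)
    else true                                                         -- 'else: return b'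
  else true                                                           -- while-else: 'return b'
termination_by m.toNat
decreasing_by
  have h1 := pvFloordiv_shrink h.1 h.2
  have h2 := pvFloordiv_shrink h.1 h'
  omega

-- A's outer 'while True: … b += 1' loop, given fuel (the fuel n.toNat + 2 always
-- suffices: in base max 2 n the number n has at most two digits, so Python stops earlier);
-- 'm, x = divmod(m, b); m, y = divmod(m, b)' are the first two divmods of each round.
def pyLoopA (n : Int) : Nat → Int → Int
  | 0, _ => 0
  | f+1, b =>
    if pyInner b (PySem.Int.mod n b) (PySem.Int.mod (PySem.Int.floordiv n b) b)
        (PySem.Int.floordiv (PySem.Int.floordiv n b) b)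
    then b else pyLoopA n f (b+1)

def A344888 (n : Int) : Int := pyLoopA n (n.toNat + 2) 2

-- ===== PORT B =====
-- 'digits = []; while m > 0: m, d = divmod(m, b); digits.append(d)' (append ⇒ accumulator);
-- '1 < b' is again a totality guard only.
def altDigits (b : Int) (m : Int) (acc : List Int) : List Int :=
  if h : 1 < b ∧ 0 < m then
    altDigits b (PySem.Int.floordiv m b) (acc ++ [PySem.Int.mod m b])
  else acc
termination_by m.toNat
decreasing_by
  have h1 := pvFloordiv_shrink h.1 h.2
  omega

-- 'all(p == q for p, q in zip(digits, digits[2:]))'; digits[2:] = drop 2 (PySem.List.slice_from)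
def altCheck (digits : List Int) : Bool :=
  (digits.zip (digits.drop 2)).all (fun p => p.1 == p.2)

-- B's base loop, same fuel discipline as A's port
def altLoop (n : Int) : Nat → Int → Int
  | 0, _ => 0
  | f+1, b => if altCheck (altDigits b n []) then b else altLoop n f (b+1)

def A344888_alt (n : Int) : Int := altLoop n (n.toNat + 2) 2

-- ===== PRECONDITION & SPEC =====
def Spec_A344888 (n : Int) (out : Int) : Prop := out = A344888_alt n
instance (n : Int) (out : Int) : Decidable (Spec_A344888 n out) := by unfold Spec_A344888; infer_instance

-- ===== CLAIM (what is proved, stated in full; the proofs are below) =====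
def Claim_equal_A344888 : Prop := ∀ (n : Int), Dom_A344888 n → Spec_A344888 n (A344888 n)

-- ===== LEMMAS AND PROOFS =====

theorem pvFloordiv_nonpos {m b : Int} (hb : 1 < b) (hm : m ≤ 0) :
    PySem.Int.floordiv m b ≤ 0 := by
  rw [PySem.Int.floordiv_eq_ediv_of_pos (by omega)]
  have : m / b < 1 := Int.ediv_lt_of_lt_mul (by omega) (by omega)
  omega

-- proof-side cons form of the digit list
def digsP (b m : Int) : List Int :=
  if h : 1 < b ∧ 0 < m then
    PySem.Int.mod m b :: digsP b (PySem.Int.floordiv m b)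
  else []
termination_by m.toNat
decreasing_by
  have h1 := pvFloordiv_shrink h.1 h.2
  omega

theorem altDigits_eq (b m : Int) : ∀ acc, altDigits b m acc = acc ++ digsP b m := by
  induction m using digsP.induct b
  next m h ih =>
      intro acc
      rw [altDigits.eq_def, digsP.eq_def, dif_pos h, dif_pos h, ih]
      simp
  next m h =>
      intro acc
      rw [altDigits.eq_def, digsP.eq_def, dif_neg h, dif_neg h]
      simp

theorem altCheck_cons3 (x y z : Int) (L : List Int) :
    altCheck (x :: y :: z :: L) = ((x == z) && altCheck (y :: z :: L)) := by
  simp [altCheck]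

theorem altCheck_short (L : List Int) (h : L.length ≤ 2) : altCheck L = true := by
  match L, h with
  | [], _ => rfl
  | [a], _ => rfl
  | [a, b], _ => rfl

theorem pyInner_eq (b x y : Int) (hb : 1 < b) (m : Int) :
    pyInner b x y m = altCheck (x :: y :: digsP b m) := by
  suffices H : ∀ (k : Nat) (m : Int), m.toNat ≤ k →
      pyInner b x y m = altCheck (x :: y :: digsP b m) from H m.toNat m le_rfl
  intro k
  induction k with
  | zero =>
      intro m hm
      rw [pyInner.eq_def, digsP.eq_def,
        dif_neg (show ¬(1 < b ∧ 0 < m) by rintro ⟨-, h2⟩; omega),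
        dif_neg (show ¬(1 < b ∧ 0 < m) by rintro ⟨-, h2⟩; omega),
        altCheck_short _ (by simp)]
  | succ k ih =>
      intro m hm
      by_cases h0 : 0 < m
      · have hs := pvFloordiv_shrink hb h0
        rw [pyInner.eq_def, digsP.eq_def,
          dif_pos (show 1 < b ∧ 0 < m from ⟨hb, h0⟩),
          dif_pos (show 1 < b ∧ 0 < m from ⟨hb, h0⟩), altCheck_cons3]
        by_cases hz : PySem.Int.mod m b ≠ x
        · have hxz : (x == PySem.Int.mod m b) = false :=
            beq_eq_false_iff_ne.mpr (Ne.symm hz)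
          rw [if_pos hz, hxz, Bool.false_and]
        · push_neg at hz
          subst hz
          rw [if_neg (by simp), beq_self_eq_true, Bool.true_and]
          by_cases h1 : 0 < PySem.Int.floordiv m b
          · have hs' := pvFloordiv_shrink hb h1
            rw [dif_pos h1, digsP.eq_def,
              dif_pos (show 1 < b ∧ 0 < PySem.Int.floordiv m b from ⟨hb, h1⟩), altCheck_cons3]
            by_cases hz2 : PySem.Int.mod (PySem.Int.floordiv m b) b ≠ y
            · have hyz : (y == PySem.Int.mod (PySem.Int.floordiv m b) b) = false :=
                beq_eq_false_iff_ne.mpr (Ne.symm hz2)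
              rw [if_pos hz2, hyz, Bool.false_and]
            · push_neg at hz2
              subst hz2
              rw [if_neg (by simp), beq_self_eq_true, Bool.true_and]
              exact ih _ (by omega)
          · rw [dif_neg h1, digsP.eq_def,
              dif_neg (show ¬(1 < b ∧ 0 < PySem.Int.floordiv m b) by rintro ⟨-, h2⟩; exact h1 h2),
              altCheck_short _ (by simp)]
      · rw [pyInner.eq_def, digsP.eq_def,
          dif_neg (show ¬(1 < b ∧ 0 < m) by rintro ⟨-, h2⟩; exact h0 h2),
          dif_neg (show ¬(1 < b ∧ 0 < m) by rintro ⟨-, h2⟩; exact h0 h2),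
          altCheck_short _ (by simp)]

theorem perBase (n b : Int) (hb : 1 < b) :
    pyInner b (PySem.Int.mod n b) (PySem.Int.mod (PySem.Int.floordiv n b) b)
      (PySem.Int.floordiv (PySem.Int.floordiv n b) b) = altCheck (digsP b n) := by
  by_cases hn : 0 < n
  · rw [digsP.eq_def, dif_pos ⟨hb, hn⟩]
    by_cases hm1 : 0 < PySem.Int.floordiv n b
    · rw [digsP.eq_def, dif_pos ⟨hb, hm1⟩]
      exact pyInner_eq _ _ _ hb _
    · have h2 : PySem.Int.floordiv (PySem.Int.floordiv n b) b ≤ 0 :=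
        pvFloordiv_nonpos hb (by omega)
      rw [pyInner.eq_def,
        dif_neg (show ¬(1 < b ∧ 0 < PySem.Int.floordiv (PySem.Int.floordiv n b) b) by
          rintro ⟨-, hx⟩; omega),
        digsP.eq_def,
        dif_neg (show ¬(1 < b ∧ 0 < PySem.Int.floordiv n b) by rintro ⟨-, hx⟩; exact hm1 hx),
        altCheck_short _ (by simp)]
  · have h1 : PySem.Int.floordiv n b ≤ 0 := pvFloordiv_nonpos hb (by omega)
    have h2 : PySem.Int.floordiv (PySem.Int.floordiv n b) b ≤ 0 := pvFloordiv_nonpos hb h1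
    rw [pyInner.eq_def,
      dif_neg (show ¬(1 < b ∧ 0 < PySem.Int.floordiv (PySem.Int.floordiv n b) b) by
        rintro ⟨-, hx⟩; omega),
      digsP.eq_def, dif_neg (show ¬(1 < b ∧ 0 < n) by rintro ⟨-, hx⟩; exact hn hx),
      altCheck_short _ (by simp)]

theorem loops_eq (n : Int) : ∀ (f : Nat) (b : Int), 1 < b → pyLoopA n f b = altLoop n f b := by
  intro f
  induction f with
  | zero => intro b _; rfl
  | succ f ih =>
      intro b hb
      show (if pyInner b _ _ _ then b else pyLoopA n f (b+1)) = _
      rw [perBase n b hb, altLoop, altDigits_eq, List.nil_append]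
      split
      · rfl
      · exact ih (b+1) (by omega)

-- ===== VERDICT (by name: the statement is the Claim_ definition above) =====
theorem A344888_spec : Claim_equal_A344888 := by
  intro n _
  unfold Spec_A344888 A344888 A344888_alt
  exact loops_eq n _ 2 (by omega)
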